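-- pv_equiv track=rewrite | github.com/Aditya777/CreditSuisseITChallenge2020 | codeitsuisse/routes/salad_spree.py | fun_salad
-- ===== SOURCE A (Python) =====
-- def fun_salad(n, streets):
--     min_cost = float('inf')
--     for st in streets:
--         l = 0
--         r = 0
--
--         street_len = len(st)
--         cur_len = 0
--         cur_cost = 0
--
--         while r < street_len:
--             if st[r] == 'X':
--                 l = r+1
--                 r = r+1
--                 cur_cost = 0
--                 cur_len = 0
--             elif cur_len < n:
--                 cur_cost += int(st[r])
--                 cur_len+=1
--                 r += 1
--                 if cur_len ==n:
--                     min_cost = min(min_cost, cur_cost)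
--
--             else:
--                 cur_cost += int(st[r])
--                 cur_cost -= int(st[l])
--                 r+=1
--                 l+=1
--                 min_cost = min(min_cost, cur_cost)
--
--     if min_cost != float('inf'):
--         return min_cost
--     else:
--         return 0
-- ===== SOURCE B (Python) =====
-- def fun_salad(n, streets):
--     best = None
--     for st in streets:
--         for run in st.split('X'):
--             vals = [int(ch) for ch in run]
--             if 1 <= n <= len(vals):
--                 pre = [0]
--                 for v in vals:
--                     pre.append(pre[-1] + v)
--                 for i in range(len(vals) - n + 1):
--                     s = pre[i + n] - pre[i]
--                     best = s if best is None else min(best, s)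
--     return best if best is not None else 0
-- ===== Notes on version B (the rewrite author's own statement) =====
-- stated objective: simpler
-- what changed: Replaces A's single-pass sliding-window loop with interleaved reset/warm-up/slide pointer bookkeeping by a two-phase computation: split each street on 'X' into maximal runs, build a prefix-sum list per run, and take the minimum of all length-n window sums pre[i+n]-pre[i], returning 0 when no window fits or n <= 0.
import Mathlib
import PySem

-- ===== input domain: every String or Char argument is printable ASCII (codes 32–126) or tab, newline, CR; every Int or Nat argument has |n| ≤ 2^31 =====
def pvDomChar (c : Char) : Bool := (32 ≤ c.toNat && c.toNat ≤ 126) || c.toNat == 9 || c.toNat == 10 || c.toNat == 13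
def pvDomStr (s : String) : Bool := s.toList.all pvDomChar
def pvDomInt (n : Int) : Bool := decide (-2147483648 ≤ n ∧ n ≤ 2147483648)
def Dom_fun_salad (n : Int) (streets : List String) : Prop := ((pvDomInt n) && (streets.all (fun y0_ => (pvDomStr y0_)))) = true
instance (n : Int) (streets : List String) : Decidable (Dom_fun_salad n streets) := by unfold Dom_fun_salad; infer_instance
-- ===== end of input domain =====

-- B replaces A's interleaved reset/slide pointer loop by a two-phase split-on-'X' + prefix-sum
-- window computation (objective: a simpler decomposition; same asymptotic cost).

-- ===== PORT A =====
-- int(st[r]) for a single char; exact on digit characters (Pre_ excludes all others,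
-- where Python raises ValueError).
def aDigit (c : Char) : Int := (c.toNat : Int) - 48

-- min(min_cost, cur_cost) with min_cost = float('inf') represented as `none`.
def aMin (m : Option Int) (v : Int) : Int := match m with | none => v | some x => min x v

-- the while loop: `ls`/`rs` are the suffixes of the street at indices l and r
-- (st[l] = ls.headD; in A, l ≤ r < len whenever st[l] is read, so headD is exact).
def loopA (n : Int) (ls rs : List Char) (curLen curCost : Int) (m : Option Int) : Option Int :=
  match rs with
  | [] => m
  | c :: rest =>
    if c = 'X' then loopA n rest rest 0 0 m
    else if curLen < n then
      let cost := curCost + aDigit c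
      loopA n ls rest (curLen + 1) cost (if curLen + 1 = n then some (aMin m cost) else m)
    else
      let cost := curCost + aDigit c - aDigit (ls.headD ' ')
      loopA n ls.tail rest curLen cost (some (aMin m cost))

def fun_salad (n : Int) (streets : List String) : Int :=
  match streets.foldl (fun m st => loopA n st.toList st.toList 0 0 m) none with
  | some v => v
  | none => 0

-- ===== PORT B =====
def bDigit (c : Char) : Int := (c.toNat : Int) - 48

-- st.split('X') (single-character separator: maximal runs, empties kept)
def splitX : List Char → List (List Char)
  | [] => [[]]
  | c :: s =>
    if c = 'X' then [] :: splitX s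
    else match splitX s with
      | r :: rs => (c :: r) :: rs
      | [] => [[c]]   -- unreachable: splitX never returns []

-- best = s if best is None else min(best, s)
def bStep (b : Option Int) (s : Int) : Option Int :=
  some (match b with | none => s | some x => min x s)

-- pre = [0]; for v in vals: pre.append(pre[-1] + v)
def bPre (vals : List Int) : List Int :=
  vals.foldl (fun p v => p ++ [p.getLastD 0 + v]) [0]

-- one run: vals = [int(ch) for ch in run]; if a window fits, prefix sums then
-- every window sum pre[i+n]-pre[i] (indices are in range here, so getD is exact;
-- the range count uses n.toNat = n, valid under the guard 1 <= n)
def bRun (n : Int) (b : Option Int) (run : List Char) : Option Int :=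
  let vals := run.map bDigit
  if 1 ≤ n ∧ n ≤ (vals.length : Int) then
    (List.range (vals.length + 1 - n.toNat)).foldl
      (fun b i => bStep b ((bPre vals).getD (i + n.toNat) 0 - (bPre vals).getD i 0)) b
  else b

def fun_salad_alt (n : Int) (streets : List String) : Int :=
  match streets.foldl (fun b st => (splitX st.toList).foldl (bRun n) b) none with
  | some v => v
  | none => 0

-- ===== PRECONDITION & SPEC =====
-- Pre_ excludes streets containing a character that is neither a digit nor 'X':
-- on those A raises ValueError at int(st[r]).
def Pre_fun_salad (n : Int) (streets : List String) : Prop :=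
  (streets.all (fun st => st.toList.all (fun c => c == 'X' || ('0' ≤ c && c ≤ '9')))) = true
instance (n : Int) (streets : List String) : Decidable (Pre_fun_salad n streets) := by
  unfold Pre_fun_salad; infer_instance

def pvWitness_fun_salad : Int × List String := (2, ["12X340", "9"])

def Spec_fun_salad (n : Int) (streets : List String) (out : Int) : Prop := out = fun_salad_alt n streets
instance (n : Int) (streets : List String) (out : Int) : Decidable (Spec_fun_salad n streets out) := by unfold Spec_fun_salad; infer_instance

-- ===== CLAIM (what is proved, stated in full; the proofs are below) =====
def Claim_equal_fun_salad : Prop := ∀ (n : Int) (streets : List String), Dom_fun_salad n streets → Pre_fun_salad n streets → Spec_fun_salad n streets (fun_salad n streets)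

-- ===== LEMMAS AND PROOFS =====

-- digit sum of a char list
def sumD (u : List Char) : Int := (u.map aDigit).sum

-- all length-k window sums of a run, left to right
def runMins (k : Nat) (u : List Char) : List Int :=
  (List.range (u.length + 1 - k)).map (fun i => sumD ((u.drop i).take k))

def pushMin (m : Option Int) (v : Int) : Option Int := some (aMin m v)

theorem sumD_append (a b : List Char) : sumD (a ++ b) = sumD a + sumD b := by
  simp [sumD]

theorem take_ge {α : Type} : ∀ (a : List α) (k : Nat), a.length ≤ k → a.take k = a
  | [], _, _ => by simp
  | c :: a, k+1, h => by simp [take_ge a k (by simpa using h)]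
  | _ :: _, 0, h => by simp at h

theorem take_exact {α : Type} (a b : List α) (k : Nat) (h : a.length = k) :
    (a ++ b).take k = a := by
  subst h; rw [List.take_append]; simp

-- ---- n ≤ 0 : A always ends with 0 ----
theorem loopA_nonpos (n : Int) (hn : n ≤ 0) :
    ∀ (s : List Char) (m : Option Int), m = none ∨ m = some 0 →
      loopA n s s 0 0 m = none ∨ loopA n s s 0 0 m = some 0 := by
  intro s
  induction s with
  | nil => intro m hm; simpa [loopA] using hm
  | cons c rest ih =>
    intro m hm
    by_cases hc : c = 'X'
    · simpa [loopA, hc] using ih m hm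
    · have h0 : ¬ ((0:Int) < n) := by omega
      have hstep : loopA n (c :: rest) (c :: rest) 0 0 m
          = loopA n rest rest 0 0 (some (aMin m 0)) := by
        simp [loopA, hc, h0]
      rw [hstep]
      apply ih
      rcases hm with h | h <;> simp [h, aMin]

theorem streets_nonpos (n : Int) (hn : n ≤ 0) :
    ∀ (streets : List String) (m : Option Int), (m = none ∨ m = some 0) →
      streets.foldl (fun m st => loopA n st.toList st.toList 0 0 m) m = none ∨
      streets.foldl (fun m st => loopA n st.toList st.toList 0 0 m) m = some 0 := by
  intro streets
  induction streets with
  | nil => intro m hm; simpa using hm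
  | cons st rest ih =>
    intro m hm
    rw [List.foldl_cons]
    exact ih _ (loopA_nonpos n hn st.toList m hm)

-- ---- slide phase (cur_len = n) over an X-free remainder ----
theorem loopA_slide (n : Int) (hn : 1 ≤ n) :
    ∀ (w v t : List Char) (m : Option Int),
      (∀ c ∈ w, c ≠ 'X') → v.length = n.toNat → (t = [] ∨ ∃ t', t = 'X' :: t') →
      loopA n (v ++ (w ++ t)) (w ++ t) n (sumD v) m
        = loopA n t t 0 0
            (List.foldl pushMin m
              ((List.range w.length).map (fun i => sumD (((v ++ w).drop (i+1)).take n.toNat)))) := by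
  intro w
  induction w with
  | nil =>
    intro v t m _ _ ht
    rcases ht with rfl | ⟨t', rfl⟩
    · simp [loopA]
    · simp [loopA]
  | cons c w' ih =>
    intro v t m hw hv ht
    have hc : c ≠ 'X' := hw c List.mem_cons_self
    have hvne : v ≠ [] := by
      intro h; rw [h] at hv; simp at hv; omega
    obtain ⟨a, v₀, rfl⟩ := List.exists_cons_of_ne_nil hvne
    have hl : v₀.length + 1 = n.toNat := by simpa using hv
    have hcost : sumD (a :: v₀) + aDigit c - aDigit a = sumD (v₀ ++ [c]) := by
      simp [sumD]; ring
    have hstep : loopA n (a :: (v₀ ++ c :: (w' ++ t))) (c :: (w' ++ t)) n (sumD (a :: v₀)) m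
        = loopA n (v₀ ++ c :: (w' ++ t)) (w' ++ t) n (sumD (v₀ ++ [c]))
            (some (aMin m (sumD (v₀ ++ [c])))) := by
      simp only [loopA, if_neg hc, if_neg (lt_irrefl n), List.headD_cons, List.tail_cons, hcost]
    have H := ih (v₀ ++ [c]) t (some (aMin m (sumD (v₀ ++ [c]))))
      (fun d hd => hw d (List.mem_cons_of_mem _ hd)) (by simp; omega) ht
    simp only [List.append_assoc, List.singleton_append, List.cons_append,
      List.nil_append] at H
    have htake : (v₀ ++ (c :: w')).take n.toNat = v₀ ++ [c] := by
      rw [List.take_append, take_ge v₀ n.toNat (by omega),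
        show n.toNat - v₀.length = 1 by omega]
      simp
    have hlist : (List.range ((c :: w').length)).map
          (fun i => sumD (((a :: (v₀ ++ c :: w')).drop (i+1)).take n.toNat))
        = sumD (v₀ ++ [c]) :: (List.range w'.length).map
          (fun i => sumD (((v₀ ++ c :: w').drop (i+1)).take n.toNat)) := by
      simp only [List.length_cons, List.range_succ_eq_map, List.map_cons, List.map_map,
        Function.comp_def, Nat.succ_eq_add_one, List.drop_succ_cons, List.drop_zero, htake]
    simp only [List.append_assoc, List.singleton_append, List.cons_append]
    rw [hstep, H, hlist, List.foldl_cons]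
    rfl

-- list of window sums of v ++ w, viewed as head window v then the slide terms
theorem runMins_cons (k : Nat) (v w : List Char) (hv : v.length = k) :
    runMins k (v ++ w) = sumD v ::
      (List.range w.length).map (fun i => sumD (((v ++ w).drop (i+1)).take k)) := by
  unfold runMins
  have hlen : (v ++ w).length + 1 - k = w.length + 1 := by
    rw [List.length_append, hv]; omega
  rw [hlen]
  simp only [List.range_succ_eq_map, List.map_cons, List.map_map, Function.comp_def,
    Nat.succ_eq_add_one, List.drop_zero, take_exact v w k hv]

-- ---- warm-up phase (cur_len = |p| < n), prefix p of the run already consumed ----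
theorem loopA_warm (n : Int) (hn : 1 ≤ n) :
    ∀ (w p t : List Char) (j : Int) (m : Option Int),
      (∀ c ∈ p ++ w, c ≠ 'X') → (t = [] ∨ ∃ t', t = 'X' :: t') →
      j = (p.length : Int) → j < n →
      loopA n ((p ++ w) ++ t) (w ++ t) j (sumD p) m
        = loopA n t t 0 0 (List.foldl pushMin m (runMins n.toNat (p ++ w))) := by
  intro w
  induction w with
  | nil =>
    intro p t j m _ ht hj hpn
    have hk : (n.toNat : Int) = n := Int.toNat_of_nonneg (by omega)
    have hz : p.length + 1 - n.toNat = 0 := by omega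
    rcases ht with rfl | ⟨t', rfl⟩
    · simp [loopA, runMins, hz]
    · simp [loopA, runMins, hz]
  | cons c w' ih =>
    intro p t j m hx ht hj hpn
    have hc : c ≠ 'X' := hx c (by simp)
    have hk : (n.toNat : Int) = n := Int.toNat_of_nonneg (by omega)
    have hcost : sumD p + aDigit c = sumD (p ++ [c]) := by simp [sumD]
    have hx' : ∀ d ∈ (p ++ [c]) ++ w', d ≠ 'X' := by
      intro d hd; apply hx; simp at hd ⊢; tauto
    have hstep : loopA n (p ++ c :: (w' ++ t)) (c :: (w' ++ t)) j (sumD p) m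
        = loopA n (p ++ c :: (w' ++ t)) (w' ++ t) (j + 1) (sumD (p ++ [c]))
            (if j + 1 = n then some (aMin m (sumD (p ++ [c]))) else m) := by
      simp only [loopA, if_neg hc, if_pos hpn, hcost]
    simp only [List.append_assoc, List.singleton_append, List.cons_append]
    rw [hstep]
    by_cases hlt : j + 1 < n
    · rw [if_neg (by omega)]
      have H := ih (p ++ [c]) t (j + 1) m hx' ht (by simp [hj]) hlt
      simp only [List.append_assoc, List.singleton_append, List.cons_append,
        List.nil_append] at H
      exact H
    · have heq : j + 1 = n := by omega
      rw [if_pos heq, heq]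
      have hvlen : (p ++ [c]).length = n.toNat := by simp; omega
      have H := loopA_slide n hn w' (p ++ [c]) t (some (aMin m (sumD (p ++ [c]))))
        (fun d hd => hx' d (by simp [hd])) hvlen ht
      simp only [List.append_assoc, List.singleton_append, List.cons_append,
        List.nil_append] at H
      rw [H]
      have hr := runMins_cons n.toNat (p ++ [c]) w' hvlen
      simp only [List.append_assoc, List.singleton_append, List.cons_append,
        List.nil_append] at hr
      rw [hr, List.foldl_cons]
      rfl

-- ---- splitX on the run/separator decomposition ----
theorem splitX_no_sep (u : List Char) (hu : ∀ c ∈ u, c ≠ 'X') : splitX u = [u] := by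
  induction u with
  | nil => rfl
  | cons c u' ih =>
    have hc : c ≠ 'X' := hu c List.mem_cons_self
    simp [splitX, hc, ih (fun d hd => hu d (List.mem_cons_of_mem _ hd))]

theorem splitX_sep (u t : List Char) (hu : ∀ c ∈ u, c ≠ 'X') :
    splitX (u ++ 'X' :: t) = u :: splitX t := by
  induction u with
  | nil => simp [splitX]
  | cons c u' ih =>
    have hc : c ≠ 'X' := hu c List.mem_cons_self
    simp [splitX, hc, ih (fun d hd => hu d (List.mem_cons_of_mem _ hd))]

theorem run_decomp : ∀ (s : List Char), ∃ u t, s = u ++ t ∧ (∀ c ∈ u, c ≠ 'X') ∧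
    (t = [] ∨ ∃ t', t = 'X' :: t') := by
  intro s
  induction s with
  | nil => exact ⟨[], [], rfl, by simp, Or.inl rfl⟩
  | cons c s' ih =>
    by_cases hc : c = 'X'
    · exact ⟨[], c :: s', by simp, by simp, Or.inr ⟨s', by rw [hc]⟩⟩
    · obtain ⟨u, t, rfl, hu, ht⟩ := ih
      refine ⟨c :: u, t, by simp, ?_, ht⟩
      intro d hd
      rcases List.mem_cons.mp hd with rfl | h
      · exact hc
      · exact hu d h

theorem foldl_pushMin_flatMap (g : List Char → List Int) (l : List (List Char)) :
    ∀ m, List.foldl pushMin m (l.flatMap g) = l.foldl (fun b u => List.foldl pushMin b (g u)) m := by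
  induction l with
  | nil => intro m; simp
  | cons u l' ih => intro m; simp [List.flatMap_cons, List.foldl_append, ih]

-- ---- a whole street ----
theorem loopA_street (n : Int) (hn : 1 ≤ n) :
    ∀ (N : Nat) (s : List Char), s.length ≤ N → ∀ m,
      loopA n s s 0 0 m = List.foldl pushMin m ((splitX s).flatMap (runMins n.toNat)) := by
  intro N
  induction N with
  | zero =>
    intro s hs m
    have hk : (n.toNat : Int) = n := Int.toNat_of_nonneg (by omega)
    have : s = [] := by cases s with | nil => rfl | cons a b => simp at hs
    subst this
    simp [loopA, splitX, runMins, show 0 + 1 - n.toNat = 0 by omega]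
  | succ N ih =>
    intro s hs m
    obtain ⟨u, t, rfl, hu, ht⟩ := run_decomp s
    have hw := loopA_warm n hn u [] t 0 m (by simpa using hu) ht (by simp)
      (by omega)
    simp only [List.nil_append, show sumD [] = 0 from rfl] at hw
    rw [hw]
    rcases ht with rfl | ⟨t', rfl⟩
    · simp only [List.append_nil]
      rw [splitX_no_sep u hu]
      simp [loopA, List.flatMap_cons]
    · rw [splitX_sep u t' hu]
      have hlen : t'.length ≤ N := by simp at hs; omega
      have hXstep : loopA n ('X' :: t') ('X' :: t') 0 0
          (List.foldl pushMin m (runMins n.toNat u))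
          = loopA n t' t' 0 0 (List.foldl pushMin m (runMins n.toNat u)) := by
        simp [loopA]
      rw [hXstep, ih t' hlen, List.flatMap_cons, List.foldl_append]

-- ---- B's prefix-sum list ----
theorem preFold (vals : List Int) : ∀ (p : List Int) (x : Int),
    List.foldl (fun p v => p ++ [p.getLastD 0 + v]) (p ++ [x]) vals
      = p ++ List.scanl (fun a v => a + v) x vals := by
  induction vals with
  | nil => intro p x; simp
  | cons v vals' ih =>
    intro p x
    rw [List.foldl_cons, List.getLastD_concat, ih (p ++ [x]) (x + v), List.scanl_cons]
    simp

theorem scanl_getD (vals : List Int) : ∀ (x : Int) (i : Nat), i ≤ vals.length →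
    (List.scanl (fun a v => a + v) x vals).getD i 0 = x + (vals.take i).sum := by
  induction vals with
  | nil =>
    intro x i hi
    simp only [List.length_nil, Nat.le_zero] at hi
    subst hi
    simp [List.scanl_nil]
  | cons v vals' ih =>
    intro x i hi
    cases i with
    | zero => simp [List.scanl_cons]
    | succ j =>
      rw [List.scanl_cons, List.getD_cons_succ, ih (x + v) j (by simpa using hi)]
      simp
      ring

theorem bStep_eq (b : Option Int) (s : Int) : bStep b s = pushMin b s := by
  cases b <;> rfl

theorem sum_take_map (run : List Char) (j : Nat) :
    ((run.map bDigit).take j).sum = sumD (run.take j) := by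
  rw [← List.map_take]; rfl

-- ---- B's run computation equals the window-sum fold ----
theorem bRun_eq (n : Int) (hn : 1 ≤ n) (b : Option Int) (run : List Char) :
    bRun n b run = List.foldl pushMin b (runMins n.toNat run) := by
  have hk : (n.toNat : Int) = n := Int.toNat_of_nonneg (by omega)
  by_cases h : n ≤ (run.length : Int)
  · have hkle : n.toNat ≤ run.length := by omega
    simp only [bRun, List.length_map]
    rw [if_pos ⟨hn, h⟩]
    have hpre : bPre (run.map bDigit) = List.scanl (fun a v => a + v) 0 (run.map bDigit) := by
      simpa [bPre] using preFold (run.map bDigit) [] 0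
    have hcong : List.foldl
        (fun b i => bStep b ((bPre (run.map bDigit)).getD (i + n.toNat) 0
          - (bPre (run.map bDigit)).getD i 0)) b
        (List.range (run.length + 1 - n.toNat))
        = List.foldl (fun b i => pushMin b (sumD ((run.drop i).take n.toNat))) b
        (List.range (run.length + 1 - n.toNat)) := by
      apply PySem.List.foldl_congr_mem
      intro acc i hi
      have hi' : i + n.toNat ≤ run.length := by
        have := List.mem_range.mp hi; omega
      rw [hpre, scanl_getD (run.map bDigit) 0 (i + n.toNat) (by simpa using hi'),
        scanl_getD (run.map bDigit) 0 i (by simp; omega),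
        sum_take_map, sum_take_map]
      have htk : run.take (i + n.toNat) = run.take i ++ (run.drop i).take n.toNat :=
        List.take_add ..
      rw [htk, sumD_append, bStep_eq]
      congr 1
      ring
    rw [hcong]
    unfold runMins
    rw [List.foldl_map]
  · simp only [bRun, List.length_map]
    rw [if_neg (by rintro ⟨h1, h2⟩; omega)]
    have hz : run.length + 1 - n.toNat = 0 := by omega
    simp [runMins, hz]

-- ---- n ≤ 0 : B's fold never moves ----
theorem bRun_nonpos (n : Int) (hn : n ≤ 0) (b : Option Int) (run : List Char) :
    bRun n b run = b := by
  simp only [bRun]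
  rw [if_neg (by rintro ⟨h1, h2⟩; omega)]

theorem bfold_nonpos (n : Int) (hn : n ≤ 0) (streets : List String) :
    streets.foldl (fun b st => (splitX st.toList).foldl (bRun n) b) (none : Option Int)
      = none := by
  have hin : ∀ (l : List (List Char)) (b : Option Int), l.foldl (bRun n) b = b := by
    intro l
    induction l with
    | nil => intro b; rfl
    | cons u l' ih => intro b; rw [List.foldl_cons, bRun_nonpos n hn b u, ih b]
  induction streets with
  | nil => rfl
  | cons st rest ih => rw [List.foldl_cons, hin _ none, ih]

theorem main_pos (n : Int) (hn : 1 ≤ n) (streets : List String) :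
    streets.foldl (fun m st => loopA n st.toList st.toList 0 0 m) none
      = streets.foldl (fun b st => (splitX st.toList).foldl (bRun n) b) none := by
  have hfun : ∀ (s : List Char) (m : Option Int),
      loopA n s s 0 0 m = (splitX s).foldl (bRun n) m := by
    intro s m
    rw [loopA_street n hn s.length s le_rfl m, foldl_pushMin_flatMap]
    apply PySem.List.foldl_congr_mem
    intro acc u _
    exact (bRun_eq n hn acc u).symm
  have : (fun (m : Option Int) (st : String) => loopA n st.toList st.toList 0 0 m)
      = (fun (m : Option Int) (st : String) => (splitX st.toList).foldl (bRun n) m) := by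
    funext m st
    exact hfun st.toList m
  rw [this]

-- ===== VERDICT (by name: the statement is the Claim_ definition above) =====
theorem fun_salad_spec : Claim_equal_fun_salad := by
  intro n streets _ _
  unfold Spec_fun_salad fun_salad fun_salad_alt
  by_cases hn : n ≤ 0
  · rw [bfold_nonpos n hn streets]
    rcases streets_nonpos n hn streets none (Or.inl rfl) with h | h <;> rw [h]
  · rw [main_pos n (by omega) streets]
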